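-- pv_equiv track=rewrite | github.com/miliar/Code_Jam_Webscraper | Solutions_in_python/Problem_214/main.py | korvaa_plussa_listalla
-- ===== SOURCE A (Python) =====
-- def korvaa_plussa_listalla(rivit, sarakkeet, talo, joukko):
--   result = [[] for s in range(rivit)]
--
--   for r in range(rivit):
--     result[r] = talo[r][:]
--
--   i = 0;
--   for r in range(rivit):
--     for s in range(sarakkeet):
--       if(result[r][s] == "+"):
--         result[r][s] = joukko[i]
--         i += 1;
--   return result;
-- ===== SOURCE B (Python) =====
-- def korvaa_plussa_listalla(rivit, sarakkeet, talo, joukko):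
--     # prefix-sum decomposition: count the '+' cells per row first, then build
--     # every output row independently from its own slice of joukko
--     counts = [talo[r][:sarakkeet].count("+") for r in range(rivit)]
--     offsets = [0]
--     for c in counts:
--         offsets.append(offsets[-1] + c)
--
--     def fill_row(r):
--         pool = joukko[offsets[r]:offsets[r + 1]]
--         out, k = [], 0
--         for s, cell in enumerate(talo[r]):
--             if s < sarakkeet and cell == "+":
--                 out.append(pool[k])
--                 k += 1
--             else:
--                 out.append(cell)
--         return out
--
--     return [fill_row(r) for r in range(rivit)]
-- ===== Notes on version B (the rewrite author's own statement) =====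
-- stated objective: alternative
-- what changed: Instead of A's single stateful nested scan that copies the grid and mutates it in place while threading one running joukko counter across all rows, B first computes per-row '+' counts and their prefix sums (offsets), and then builds every output row independently and without mutation from talo[r] and its own private slice joukko[offsets[r]:offsets[r+1]].
import Mathlib
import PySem

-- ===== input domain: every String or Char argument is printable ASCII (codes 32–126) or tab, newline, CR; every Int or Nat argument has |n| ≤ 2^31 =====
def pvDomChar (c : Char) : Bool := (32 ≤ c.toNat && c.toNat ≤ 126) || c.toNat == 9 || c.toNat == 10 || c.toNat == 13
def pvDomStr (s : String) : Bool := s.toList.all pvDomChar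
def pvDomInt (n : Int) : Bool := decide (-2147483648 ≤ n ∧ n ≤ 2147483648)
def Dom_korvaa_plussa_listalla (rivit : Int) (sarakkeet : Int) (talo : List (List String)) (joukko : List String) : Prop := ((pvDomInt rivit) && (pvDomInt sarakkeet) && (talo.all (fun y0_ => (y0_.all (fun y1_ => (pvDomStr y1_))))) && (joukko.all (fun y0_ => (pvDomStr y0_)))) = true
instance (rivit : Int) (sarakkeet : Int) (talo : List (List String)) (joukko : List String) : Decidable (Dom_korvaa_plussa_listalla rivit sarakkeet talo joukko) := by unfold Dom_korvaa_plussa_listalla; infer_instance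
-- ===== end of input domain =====

-- B replaces A's stateful nested scan (copy grid, mutate cells in place, thread one
-- running joukko counter across all rows) by a prefix-sum decomposition: count the '+'
-- cells per row, form offsets, then build every output row independently and without
-- mutation from its own slice of joukko (objective: alternative).
-- Equivalence is about the RETURN value; neither program mutates its arguments.

-- ===== PORT A =====
-- the inner-loop body of A, named so the proofs can refer to it
def pvStepA (joukko : List String) (r : Int) (st : List (List String) × Int) (s : Int) :
    List (List String) × Int :=
  if PySem.List.pyGetD (PySem.List.pyGetD st.1 r []) s "" = "+" then
    (PySem.List.pySetD st.1 r
       (PySem.List.pySetD (PySem.List.pyGetD st.1 r []) s (PySem.List.pyGetD joukko st.2 "")),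
     st.2 + 1)
  else st

def korvaa_plussa_listalla (rivit : Int) (sarakkeet : Int) (talo : List (List String)) (joukko : List String) : List (List String) :=
  -- result = [[] for s in range(rivit)]
  let result : List (List String) := (PySem.List.pyRange 0 rivit 1).map (fun _ => ([] : List String))
  -- for r in range(rivit): result[r] = talo[r][:]
  let result := (PySem.List.pyRange 0 rivit 1).foldl
    (fun res r => PySem.List.pySetD res r (PySem.List.slice (PySem.List.pyGetD talo r []) none none)) result
  -- i = 0; for r in range(rivit): for s in range(sarakkeet): …
  let st := (PySem.List.pyRange 0 rivit 1).foldl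
    (fun st r => (PySem.List.pyRange 0 sarakkeet 1).foldl (pvStepA joukko r) st)
    (result, (0 : Int))
  st.1

-- ===== PORT B =====
-- the loop body of fill_row: on a '+' cell among the first sarakkeet columns take pool[k]
def pvFillStepB (sarakkeet : Int) (pool : List String) (st : List String × Int)
    (p : Int × String) : List String × Int :=
  if p.1 < sarakkeet ∧ p.2 = "+" then
    (st.1 ++ [PySem.List.pyGetD pool st.2 ""], st.2 + 1)
  else (st.1 ++ [p.2], st.2)

-- fill_row(r): pool = joukko[offsets[r]:offsets[r+1]]; rebuild talo[r] cell by cell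
def pvFillRowB (sarakkeet : Int) (joukko : List String) (offsets : List Int)
    (talo : List (List String)) (r : Int) : List String :=
  let pool := PySem.List.slice joukko (some (PySem.List.pyGetD offsets r 0))
    (some (PySem.List.pyGetD offsets (r + 1) 0))
  ((PySem.List.enumerate (PySem.List.pyGetD talo r [])).foldl (pvFillStepB sarakkeet pool)
    ([], 0)).1

def korvaa_plussa_listalla_alt (rivit : Int) (sarakkeet : Int) (talo : List (List String)) (joukko : List String) : List (List String) :=
  -- counts = [talo[r][:sarakkeet].count("+") for r in range(rivit)]
  let counts : List Int := (PySem.List.pyRange 0 rivit 1).map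
    (fun r => (PySem.List.count
      (PySem.List.slice (PySem.List.pyGetD talo r []) none (some sarakkeet)) "+" : Int))
  -- offsets = [0]; for c in counts: offsets.append(offsets[-1] + c)
  let offsets : List Int := counts.foldl
    (fun offs c => offs ++ [PySem.List.pyGetD offs (-1) 0 + c]) [0]
  -- return [fill_row(r) for r in range(rivit)]
  (PySem.List.pyRange 0 rivit 1).map (pvFillRowB sarakkeet joukko offsets talo)

-- ===== PRECONDITION & SPEC =====
-- Pre_ excludes exactly the inputs on which A raises IndexError: rivit beyond talo,
-- sarakkeet beyond a scanned row, or fewer joukko elements than '+' cells in the scanned region.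
def Pre_korvaa_plussa_listalla (rivit : Int) (sarakkeet : Int) (talo : List (List String)) (joukko : List String) : Prop :=
  rivit.toNat ≤ talo.length ∧
  (∀ row ∈ talo.take rivit.toNat, sarakkeet ≤ (row.length : Int)) ∧
  ((talo.take rivit.toNat).map (fun row => (row.take sarakkeet.toNat).count "+")).sum ≤ joukko.length
instance (rivit : Int) (sarakkeet : Int) (talo : List (List String)) (joukko : List String) : Decidable (Pre_korvaa_plussa_listalla rivit sarakkeet talo joukko) := by unfold Pre_korvaa_plussa_listalla; infer_instance

def pvWitness_korvaa_plussa_listalla : Int × Int × List (List String) × List String :=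
  (1, 1, [["+"]], ["x"])

def Spec_korvaa_plussa_listalla (rivit : Int) (sarakkeet : Int) (talo : List (List String)) (joukko : List String) (out : List (List String)) : Prop := out = korvaa_plussa_listalla_alt rivit sarakkeet talo joukko
instance (rivit : Int) (sarakkeet : Int) (talo : List (List String)) (joukko : List String) (out : List (List String)) : Decidable (Spec_korvaa_plussa_listalla rivit sarakkeet talo joukko out) := by unfold Spec_korvaa_plussa_listalla; infer_instance

-- ===== CLAIM (what is proved, stated in full; the proofs are below) =====
def Claim_equal_korvaa_plussa_listalla : Prop := ∀ (rivit : Int) (sarakkeet : Int) (talo : List (List String)) (joukko : List String), Dom_korvaa_plussa_listalla rivit sarakkeet talo joukko → Pre_korvaa_plussa_listalla rivit sarakkeet talo joukko → Spec_korvaa_plussa_listalla rivit sarakkeet talo joukko (korvaa_plussa_listalla rivit sarakkeet talo joukko)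

-- ===== LEMMAS AND PROOFS =====

-- reference replacement of one row: first `sarakkeet` cells, pool consumed from the front
def pvFillRow (sarakkeet : Int) (s : Int) (row : List String) (pool : List String) :
    List String × List String :=
  match row with
  | [] => ([], pool)
  | cell :: rest =>
    if s < sarakkeet ∧ cell = "+" then
      let t := pvFillRow sarakkeet (s + 1) rest (pool.drop 1)
      (pool.headD "" :: t.1, t.2)
    else
      let t := pvFillRow sarakkeet (s + 1) rest pool
      (cell :: t.1, t.2)

-- reference replacement of a list of rows, threading the pool
def pvFillRows (sarakkeet : Int) (rows : List (List String)) (pool : List String) :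
    List (List String) :=
  match rows with
  | [] => []
  | row :: rest =>
    let t := pvFillRow sarakkeet 0 row pool
    t.1 :: pvFillRows sarakkeet rest t.2

-- canonical single-row replacement with no column bound: every "+" takes the next pool element
def pvFR (row : List String) (pool : List String) : List String × List String :=
  match row with
  | [] => ([], pool)
  | c :: rest =>
    if c = "+" then
      let t := pvFR rest (pool.drop 1)
      (pool.headD "" :: t.1, t.2)
    else
      let t := pvFR rest pool
      (c :: t.1, t.2)

theorem pvFR_length (row pool : List String) : (pvFR row pool).1.length = row.length := by
  induction row generalizing pool with
  | nil => simp [pvFR]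
  | cons c rest ih => by_cases h : c = "+" <;> simp [pvFR, h, ih]

theorem pvFR_append_singleton (xs : List String) (c : String) (pool : List String) :
    pvFR (xs ++ [c]) pool =
      (if c = "+" then ((pvFR xs pool).1 ++ [((pvFR xs pool).2).headD ""], ((pvFR xs pool).2).drop 1)
       else ((pvFR xs pool).1 ++ [c], (pvFR xs pool).2)) := by
  induction xs generalizing pool with
  | nil => by_cases h : c = "+" <;> simp [pvFR, h]
  | cons x rest ih =>
    by_cases h : c = "+"
    · subst h; by_cases hx : x = "+" <;> simp [pvFR, hx, ih, List.cons_append]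
    · by_cases hx : x = "+" <;> simp [pvFR, hx, ih, h, List.cons_append]

-- the first component of pvFR sees only as many pool elements as the row has '+' cells
theorem pvFR_fst_take (row : List String) (pool : List String) (m : Nat)
    (h : row.count "+" ≤ m) : (pvFR row (pool.take m)).1 = (pvFR row pool).1 := by
  induction row generalizing pool m with
  | nil => simp [pvFR]
  | cons c rest ih =>
    by_cases hc : c = "+"
    · have hcnt : rest.count "+" + 1 ≤ m := by
        simpa [hc, List.count_cons] using h
      have hm1 : 1 ≤ m := by omega
      have hhd : (pool.take m).headD "" = pool.headD "" := by
        cases pool with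
        | nil => simp
        | cons p ps =>
          obtain ⟨m', rfl⟩ : ∃ m', m = m' + 1 := ⟨m - 1, by omega⟩
          simp [List.take_succ_cons]
      have hdt : (pool.take m).drop 1 = (pool.drop 1).take (m - 1) := by
        rw [List.drop_take]
      simp only [pvFR, hc, hhd, hdt]
      rw [ih _ _ (by omega)]
      simp
    · have hcnt : rest.count "+" ≤ m := by
        have := h; rw [List.count_cons] at this; simp [hc] at this; omega
      simp only [pvFR, hc]
      rw [if_neg (by simp), if_neg (by simp), ih _ _ hcnt]

-- B's per-row pass, normalised: only the first (sarakkeet - s) cells are transformed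
theorem pvFillRow_eq_pvFR (sarakkeet s : Int) (row pool : List String) :
    pvFillRow sarakkeet s row pool =
      ((pvFR (row.take (sarakkeet - s).toNat) pool).1 ++ row.drop (sarakkeet - s).toNat,
       (pvFR (row.take (sarakkeet - s).toNat) pool).2) := by
  induction row generalizing s pool with
  | nil => simp [pvFillRow, pvFR]
  | cons cell rest ih =>
    by_cases hs : s < sarakkeet
    · have hm : (sarakkeet - s).toNat = (sarakkeet - (s + 1)).toNat + 1 := by omega
      by_cases hc : cell = "+"
      · simp [pvFillRow, hs, hc, hm, pvFR, ih]
      · simp [pvFillRow, hs, hc, hm, pvFR, ih]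
    · have hm : (sarakkeet - s).toNat = 0 := by omega
      have hm1 : (sarakkeet - (s + 1)).toNat = 0 := by omega
      simp [pvFillRow, hs, hm, hm1, pvFR, ih]

-- A's inner-loop step, acting on a single row and the joukko index
def pvRowStep (joukko : List String) (st : List String × Int) (s : Int) : List String × Int :=
  if PySem.List.pyGetD st.1 s "" = "+"
  then (PySem.List.pySetD st.1 s (PySem.List.pyGetD joukko st.2 ""), st.2 + 1)
  else st

-- A's inner loop is row-local
theorem pvStepA_row_local (joukko : List String) (L : List Int) (r : Nat)
    (res : List (List String)) (i : Int) (hr : r < res.length) :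
    L.foldl (pvStepA joukko (r : Int)) (res, i) =
      (res.set r (L.foldl (pvRowStep joukko) (res[r], i)).1,
       (L.foldl (pvRowStep joukko) (res[r], i)).2) := by
  induction L generalizing res i with
  | nil => simp
  | cons a L ih =>
    simp only [List.foldl_cons]
    have hget : PySem.List.pyGetD res (r : Int) [] = res[r] := by
      rw [PySem.List.pyGetD_natCast]; exact List.getD_eq_getElem _ _ hr
    by_cases hc : PySem.List.pyGetD res[r] a "" = "+"
    · rw [show pvStepA joukko (r : Int) (res, i) a
          = (res.set r (PySem.List.pySetD res[r] a (PySem.List.pyGetD joukko i "")), i + 1) from by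
        simp [pvStepA, hget, hc]]
      rw [ih _ _ (by simpa using hr)]
      simp [pvRowStep, List.getElem_set_self, List.set_set, hc]
    · rw [show pvStepA joukko (r : Int) (res, i) a = (res, i) from by simp [pvStepA, hget, hc]]
      rw [ih _ _ hr]
      simp [pvRowStep, hc]

theorem pv_count_take_mono (l : List String) (a b : Nat) (h : a ≤ b) :
    (l.take a).count "+" ≤ (l.take b).count "+" := by
  conv_rhs => rw [← List.take_append_drop a (l.take b)]
  rw [List.count_append, List.take_take, Nat.min_eq_left h]
  exact Nat.le_add_right _ _

theorem pvFillRows_length (sarakkeet : Int) (rows : List (List String)) (pool : List String) :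
    (pvFillRows sarakkeet rows pool).length = rows.length := by
  induction rows generalizing pool with
  | nil => simp [pvFillRows]
  | cons row rest ih => simp [pvFillRows, ih]

-- the pool left over after the reference replacement has processed `rows`
def pvPool (sarakkeet : Int) (rows : List (List String)) (pool : List String) : List String :=
  rows.foldl (fun p row => (pvFillRow sarakkeet 0 row p).2) pool

theorem pvFillRows_append_singleton (sarakkeet : Int) (rows : List (List String))
    (row : List String) (pool : List String) :
    pvFillRows sarakkeet (rows ++ [row]) pool =
      pvFillRows sarakkeet rows pool ++ [(pvFillRow sarakkeet 0 row (pvPool sarakkeet rows pool)).1] ∧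
    pvPool sarakkeet (rows ++ [row]) pool =
      (pvFillRow sarakkeet 0 row (pvPool sarakkeet rows pool)).2 := by
  induction rows generalizing pool with
  | nil => simp [pvFillRows, pvPool]
  | cons r0 rest ih =>
    constructor
    · simp only [List.cons_append, pvFillRows]
      rw [(ih _).1]
      simp [pvPool]
    · simp only [List.cons_append, pvPool, List.foldl_cons]
      exact (ih ((pvFillRow sarakkeet 0 r0 pool).2)).2

-- set at the boundary between a processed prefix and the untouched suffix
theorem pv_set_boundary {α : Type} (ys : List α) (row : List α) (j : Nat)
    (hys : ys.length = j) (hj : j < row.length) (v : α) :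
    (ys ++ row.drop j).set j v = ys ++ v :: row.drop (j + 1) := by
  subst hys
  rw [List.set_append_right _ _ (le_refl _), Nat.sub_self,
    List.drop_eq_getElem_cons hj, List.set_cons_zero]

-- A's inner loop over the first j columns, against the canonical replacement pvFR
theorem pvRowFold_eq (sarakkeet : Int) (joukko row : List String) (i j : Nat)
    (hk : sarakkeet.toNat ≤ row.length)
    (hi : i + (row.take sarakkeet.toNat).count "+" ≤ joukko.length)
    (hj : j ≤ sarakkeet.toNat) :
    ((List.range j).map (fun (k : Nat) => (k : Int))).foldl (pvRowStep joukko) (row, (i : Int)) =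
      ((pvFR (row.take j) (joukko.drop i)).1 ++ row.drop j,
       ((i + (row.take j).count "+" : Nat) : Int)) ∧
    (pvFR (row.take j) (joukko.drop i)).2 = joukko.drop (i + (row.take j).count "+") := by
  induction j with
  | zero => simp [pvFR]
  | succ j ih =>
    obtain ⟨ih1, ih2⟩ := ih (by omega)
    have hjrow : j < row.length := by omega
    have hys : (pvFR (row.take j) (joukko.drop i)).1.length = j := by
      rw [pvFR_length]; simp; omega
    have htake : row.take (j + 1) = row.take j ++ [row[j]] := by
      rw [List.take_add_one]; simp [List.getElem?_eq_getElem hjrow]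
    have hfr := pvFR_append_singleton (row.take j) row[j] (joukko.drop i)
    rw [List.range_succ, List.map_append, List.foldl_append, ih1]
    simp only [List.map_cons, List.map_nil, List.foldl_cons, List.foldl_nil]
    have hget : PySem.List.pyGetD ((pvFR (row.take j) (joukko.drop i)).1 ++ row.drop j) (j : Int) ""
        = row[j] := by
      rw [PySem.List.pyGetD_natCast, List.getD_eq_getElem?_getD,
        List.getElem?_append_right (by omega)]
      simp [hys, hjrow]
    by_cases hcell : row[j] = "+"
    · have hcnt1 : (row.take (j + 1)).count "+" = (row.take j).count "+" + 1 := by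
        rw [htake, List.count_append]; simp [hcell]
      have hmono := pv_count_take_mono row (j + 1) sarakkeet.toNat (by omega)
      have hlt : i + (row.take j).count "+" < joukko.length := by omega
      have hv : PySem.List.pyGetD joukko ((i + (row.take j).count "+" : Nat) : Int) ""
          = joukko[i + (row.take j).count "+"] := by
        rw [PySem.List.pyGetD_natCast]; exact List.getD_eq_getElem _ _ hlt
      have hhead : (joukko.drop (i + (row.take j).count "+")).headD ""
          = joukko[i + (row.take j).count "+"] := by
        rw [List.headD_eq_head?_getD, List.head?_drop]
        simp [List.getElem?_eq_getElem hlt]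
      rw [← htake] at hfr
      rw [if_pos hcell] at hfr
      refine ⟨?_, ?_⟩
      · simp only [pvRowStep, hget, hcell, reduceIte, PySem.List.pySetD_natCast, hv]
        rw [pv_set_boundary _ _ _ hys hjrow]
        rw [hfr]
        refine Prod.ext ?_ ?_
        · simp [ih2, List.getElem?_eq_getElem hlt]
        · simp only [hcnt1]; push_cast; ring
      · rw [hfr]
        simp only [ih2, hcnt1]
        rw [List.drop_drop, show i + List.count "+" (List.take j row) + 1
          = i + (List.count "+" (List.take j row) + 1) from by omega]
    · have hcnt0 : (row.take (j + 1)).count "+" = (row.take j).count "+" := by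
        rw [htake, List.count_append]
        simp [hcell]
      rw [← htake] at hfr
      rw [if_neg hcell] at hfr
      refine ⟨?_, ?_⟩
      · simp only [pvRowStep, hget, hcnt0, if_neg hcell]
        rw [hfr]
        refine Prod.ext ?_ ?_
        · simp [List.append_assoc, (List.drop_eq_getElem_cons hjrow).symm]
        · rfl
      · rw [hfr, hcnt0]
        exact ih2

-- A's full inner loop for one row equals the reference pvFillRow on the remaining pool
theorem pvRowFold_pyRange (sarakkeet : Int) (joukko row : List String) (i : Nat)
    (hk : sarakkeet ≤ (row.length : Int))
    (hi : i + (row.take sarakkeet.toNat).count "+" ≤ joukko.length) :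
    (PySem.List.pyRange 0 sarakkeet 1).foldl (pvRowStep joukko) (row, (i : Int)) =
      ((pvFillRow sarakkeet 0 row (joukko.drop i)).1,
       ((i + (row.take sarakkeet.toNat).count "+" : Nat) : Int)) ∧
    (pvFillRow sarakkeet 0 row (joukko.drop i)).2 =
      joukko.drop (i + (row.take sarakkeet.toNat).count "+") := by
  by_cases hpos : 0 < sarakkeet
  · have hr : PySem.List.pyRange 0 sarakkeet 1
        = (List.range sarakkeet.toNat).map (fun (k : Nat) => (k : Int)) := by
      rw [PySem.List.pyRange_one]; simp
    have hkn : sarakkeet.toNat ≤ row.length := by omega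
    obtain ⟨h1, h2⟩ := pvRowFold_eq sarakkeet joukko row i sarakkeet.toNat hkn hi le_rfl
    constructor
    · rw [hr, h1, pvFillRow_eq_pvFR]
      simp
    · rw [pvFillRow_eq_pvFR]
      simpa using h2
  · have hr0 : PySem.List.pyRange 0 sarakkeet 1 = [] := PySem.List.pyRange_one_eq_nil (by omega)
    have ht0 : sarakkeet.toNat = 0 := by omega
    rw [hr0, pvFillRow_eq_pvFR]
    simp [ht0, pvFR]

-- A's first two passes build talo.take n
theorem pvInitA (talo : List (List String)) (n m : Nat) (hm : m ≤ n) (hn : n ≤ talo.length)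
    (res0 : List (List String)) (hlen : res0.length = n) :
    ((List.range m).map (fun (k : Nat) => (k : Int))).foldl
      (fun res r => PySem.List.pySetD res r (PySem.List.slice (PySem.List.pyGetD talo r []) none none)) res0
    = talo.take m ++ res0.drop m := by
  induction m with
  | zero => simp
  | succ m ih =>
    rw [List.range_succ, List.map_append, List.foldl_append, ih (by omega)]
    have hmt : m < talo.length := by omega
    have hlen2 : (talo.take m ++ res0.drop m).length = n := by
      simp [hlen]; omega
    simp only [List.map_cons, List.map_nil, List.foldl_cons, List.foldl_nil]
    rw [PySem.List.pySetD_natCast, PySem.List.pyGetD_natCast, PySem.List.slice_none_none]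
    rw [List.getD_eq_getElem _ _ hmt]
    rw [List.set_eq_take_append_cons_drop]
    have hmlen : m < (talo.take m ++ res0.drop m).length := by omega
    simp only [if_pos hmlen]
    have h1 : (talo.take m ++ res0.drop m).take m = talo.take m := by
      rw [List.take_append_of_le_length (by simp; omega)]
      simp [List.take_take]
    have h2 : (talo.take m ++ res0.drop m).drop (m + 1) = res0.drop (m + 1) := by
      have htl : (talo.take m).length = m := by simp; omega
      rw [show m + 1 = (talo.take m).length + 1 from by omega, List.drop_append]
      simp [htl]
    rw [h1, h2]
    have hts : talo.take (m + 1) = talo.take m ++ [talo[m]] := by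
      rw [List.take_add_one]; simp [List.getElem?_eq_getElem hmt]
    rw [hts, List.append_assoc, List.singleton_append]

-- A's outer loop against the reference pvFillRows, row by row
theorem pvOuter (sarakkeet : Int) (joukko : List String) (rows : List (List String)) (m : Nat)
    (hm : m ≤ rows.length)
    (hs : ∀ row ∈ rows, sarakkeet ≤ (row.length : Int))
    (hc : (rows.map (fun row => (row.take sarakkeet.toNat).count "+")).sum ≤ joukko.length) :
    ((List.range m).map (fun (k : Nat) => (k : Int))).foldl
      (fun st r => (PySem.List.pyRange 0 sarakkeet 1).foldl (pvStepA joukko r) st)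
      (rows, (0 : Int)) =
      (pvFillRows sarakkeet (rows.take m) joukko ++ rows.drop m,
       ((((rows.take m).map (fun row => (row.take sarakkeet.toNat).count "+")).sum : Nat) : Int)) ∧
    pvPool sarakkeet (rows.take m) joukko =
      joukko.drop (((rows.take m).map (fun row => (row.take sarakkeet.toNat).count "+")).sum) := by
  induction m with
  | zero => simp [pvFillRows, pvPool]
  | succ m ihm =>
    obtain ⟨ih1, ih2⟩ := ihm (by omega)
    have hmr : m < rows.length := by omega
    have hPlen : (pvFillRows sarakkeet (rows.take m) joukko).length = m := by
      rw [pvFillRows_length]; simp; omega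
    have htake : rows.take (m + 1) = rows.take m ++ [rows[m]] := by
      rw [List.take_add_one]; simp [List.getElem?_eq_getElem hmr]
    have hCsucc : ((rows.take (m + 1)).map (fun row => (row.take sarakkeet.toNat).count "+")).sum
        = ((rows.take m).map (fun row => (row.take sarakkeet.toNat).count "+")).sum
          + (rows[m].take sarakkeet.toNat).count "+" := by
      rw [htake, List.map_append, List.sum_append]; simp
    have hCle : ((rows.take (m + 1)).map (fun row => (row.take sarakkeet.toNat).count "+")).sum
        ≤ joukko.length := by
      refine le_trans ?_ hc
      conv_rhs => rw [← List.take_append_drop (m + 1) rows]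
      rw [List.map_append, List.sum_append]
      exact Nat.le_add_right _ _
    rw [List.range_succ, List.map_append, List.foldl_append, ih1]
    simp only [List.map_cons, List.map_nil, List.foldl_cons, List.foldl_nil]
    have hreslen : m < (pvFillRows sarakkeet (rows.take m) joukko ++ rows.drop m).length := by
      simp [hPlen]; omega
    rw [pvStepA_row_local joukko _ m _ _ hreslen]
    have hresm : (pvFillRows sarakkeet (rows.take m) joukko ++ rows.drop m)[m] = rows[m] := by
      rw [List.getElem_append_right (by omega)]
      simp [hPlen]
    rw [hresm]
    obtain ⟨hr1, hr2⟩ := pvRowFold_pyRange sarakkeet joukko rows[m]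
      (((rows.take m).map (fun row => (row.take sarakkeet.toNat).count "+")).sum)
      (hs _ (List.getElem_mem hmr)) (by omega)
    rw [hr1]
    have hfrs := pvFillRows_append_singleton sarakkeet (rows.take m) rows[m] joukko
    refine ⟨Prod.ext ?_ ?_, ?_⟩
    · rw [pv_set_boundary _ _ _ hPlen hmr]
      rw [htake, hfrs.1, ih2]
      simp
    · rw [hCsucc]
    · rw [htake, hfrs.2, ih2, hr2, List.map_append, List.sum_append]
      simp

-- ===== B-side lemmas =====

-- mapping a function of talo[r] over range n is mapping it over talo.take n
theorem pvMapRows {β : Type} (talo : List (List String)) (f : List String → β)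
    (n : Nat) (hn : n ≤ talo.length) :
    ((List.range n).map (fun (k : Nat) => (k : Int))).map
      (fun r => f (PySem.List.pyGetD talo r [])) = (talo.take n).map f := by
  induction n with
  | zero => simp
  | succ m ih =>
    have hmt : m < talo.length := by omega
    have hts : talo.take (m + 1) = talo.take m ++ [talo[m]] := by
      rw [List.take_add_one]; simp [List.getElem?_eq_getElem hmt]
    rw [List.range_succ, List.map_append, List.map_append, ih (by omega), hts, List.map_append]
    simp only [List.map_cons, List.map_nil, List.append_cancel_left_eq]
    simp [List.getD_eq_getElem?_getD, List.getElem?_eq_getElem hmt]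

-- the per-row '+' counts B computes, as a function of the row list
def pvCounts (sarakkeet : Int) (rows : List (List String)) : List Int :=
  rows.map (fun row => (PySem.List.count (PySem.List.slice row none (some sarakkeet)) "+" : Int))

theorem pvCounts_eq (sarakkeet : Int) (rows : List (List String)) (h : 0 ≤ sarakkeet) :
    pvCounts sarakkeet rows
      = rows.map (fun row => (((row.take sarakkeet.toNat).count "+" : Nat) : Int)) := by
  unfold pvCounts
  refine List.map_congr_left (fun row _ => ?_)
  rw [PySem.List.slice_to _ h, PySem.List.count_eq]

-- the prefix-sum list B's offsets loop builds
def pvScan (x : Int) : List Int → List Int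
  | [] => [x]
  | c :: cs => x :: pvScan (x + c) cs

theorem pvOffsetsFold (cs : List Int) (acc : List Int) (x : Int) :
    cs.foldl (fun offs c => offs ++ [PySem.List.pyGetD offs (-1) 0 + c]) (acc ++ [x])
      = acc ++ pvScan x cs := by
  induction cs generalizing acc x with
  | nil => simp [pvScan]
  | cons c cs ih =>
    simp only [List.foldl_cons, PySem.List.pyGetD_neg_one_append_singleton]
    rw [show (acc ++ [x]) ++ [x + c] = (acc ++ [x]) ++ [x + c] from rfl]
    have := ih (acc ++ [x]) (x + c)
    rw [this, pvScan, List.append_assoc, List.singleton_append]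

theorem pvScan_getD (cs : List Int) (x : Int) (j : Nat) (hj : j ≤ cs.length) :
    PySem.List.pyGetD (pvScan x cs) ((j : Nat) : Int) 0 = x + (cs.take j).sum := by
  induction cs generalizing x j with
  | nil =>
    have hj0 : j = 0 := by simpa using hj
    subst hj0
    simp [pvScan]
  | cons c cs ih =>
    cases j with
    | zero => simp [pvScan]
    | succ j =>
      rw [PySem.List.pyGetD_natCast]
      simp only [pvScan, List.getD_cons_succ]
      rw [← PySem.List.pyGetD_natCast, ih (x + c) j (by simpa using hj)]
      simp [List.take_succ_cons, add_assoc]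

-- how many pool elements B's per-row loop consumes
def pvUsed (sarakkeet : Int) (s : Int) : List String → Nat
  | [] => 0
  | c :: rest => (if s < sarakkeet ∧ c = "+" then 1 else 0) + pvUsed sarakkeet (s + 1) rest

-- B's per-row loop, against the reference pvFillRow (pool indexed from k)
theorem pvRowB (sarakkeet : Int) (pool : List String) (row : List String) (s0 : Int) (k : Nat)
    (out : List String) :
    (PySem.List.enumerate row s0).foldl (pvFillStepB sarakkeet pool) (out, ((k : Nat) : Int))
      = (out ++ (pvFillRow sarakkeet s0 row (pool.drop k)).1,
         ((k + pvUsed sarakkeet s0 row : Nat) : Int)) := by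
  induction row generalizing s0 k out with
  | nil => simp [PySem.List.enumerate, pvFillRow, pvUsed]
  | cons c rest ih =>
    rw [PySem.List.enumerate_cons, List.foldl_cons]
    by_cases hc : s0 < sarakkeet ∧ c = "+"
    · have hstep : pvFillStepB sarakkeet pool (out, ((k : Nat) : Int)) (s0, c)
          = (out ++ [PySem.List.pyGetD pool ((k : Nat) : Int) ""], ((k : Nat) : Int) + 1) := by
        simp [pvFillStepB, hc]
      have hget : PySem.List.pyGetD pool ((k : Nat) : Int) "" = (pool.drop k).headD "" := by
        rw [PySem.List.pyGetD_natCast, List.getD_eq_getElem?_getD,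
          List.headD_eq_head?_getD, List.head?_drop]
      have hcast : ((k : Nat) : Int) + 1 = (((k + 1 : Nat)) : Int) := by push_cast; ring
      rw [hstep, hcast, ih (s0 + 1) (k + 1) _]
      rw [show pool.drop (k + 1) = (pool.drop k).drop 1 from by rw [List.drop_drop, Nat.add_comm]]
      simp only [pvFillRow, hc, pvUsed, hget]
      refine Prod.ext ?_ ?_
      · simp
      · simp
        omega
    · have hstep : pvFillStepB sarakkeet pool (out, ((k : Nat) : Int)) (s0, c)
          = (out ++ [c], ((k : Nat) : Int)) := by
        simp [pvFillStepB, hc]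
      rw [hstep, ih (s0 + 1) k _]
      simp only [pvFillRow, hc, pvUsed]
      refine Prod.ext ?_ ?_
      · simp
      · simp

-- pvFillRowB, zeta-reduced and expressed through the reference pvFillRow
theorem pvFillRowB_eq (sarakkeet : Int) (joukko : List String) (offsets : List Int)
    (talo : List (List String)) (r : Int) :
    pvFillRowB sarakkeet joukko offsets talo r
      = (pvFillRow sarakkeet 0 (PySem.List.pyGetD talo r [])
          (PySem.List.slice joukko (some (PySem.List.pyGetD offsets r 0))
            (some (PySem.List.pyGetD offsets (r + 1) 0)))).1 := by
  have h := pvRowB sarakkeet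
    (PySem.List.slice joukko (some (PySem.List.pyGetD offsets r 0))
      (some (PySem.List.pyGetD offsets (r + 1) 0)))
    (PySem.List.pyGetD talo r []) 0 0 []
  simp only [Nat.cast_zero, List.drop_zero, List.nil_append] at h
  unfold pvFillRowB
  simp [h]

-- the first component of the reference pvFillRow sees only the needed prefix of the pool
theorem pvFillRow_fst_take (sarakkeet : Int) (row pool : List String) (m : Nat)
    (h : (row.take sarakkeet.toNat).count "+" ≤ m) :
    (pvFillRow sarakkeet 0 row (pool.take m)).1 = (pvFillRow sarakkeet 0 row pool).1 := by
  rw [pvFillRow_eq_pvFR, pvFillRow_eq_pvFR]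
  simp only []
  rw [pvFR_fst_take _ _ _ (by simpa using h)]

-- B's map of independent per-row fills equals the pool-threading reference pvFillRows
theorem pvOuterB (sarakkeet : Int) (joukko : List String) (rows : List (List String)) (m : Nat)
    (hm : m ≤ rows.length)
    (hs : ∀ row ∈ rows, sarakkeet ≤ (row.length : Int))
    (hc : (rows.map (fun row => (row.take sarakkeet.toNat).count "+")).sum ≤ joukko.length) :
    ((List.range m).map (fun (k : Nat) => (k : Int))).map
      (pvFillRowB sarakkeet joukko (pvScan 0 (pvCounts sarakkeet rows)) rows)
      = pvFillRows sarakkeet (rows.take m) joukko := by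
  induction m with
  | zero => simp [pvFillRows]
  | succ m ih =>
    have hmr : m < rows.length := by omega
    rw [List.range_succ, List.map_append, List.map_append, ih (by omega)]
    have htake : rows.take (m + 1) = rows.take m ++ [rows[m]] := by
      rw [List.take_add_one]; simp [List.getElem?_eq_getElem hmr]
    have hfrs := pvFillRows_append_singleton sarakkeet (rows.take m) rows[m] joukko
    have hpool := (pvOuter sarakkeet joukko rows m (by omega) hs hc).2
    rw [htake, hfrs.1]
    -- it remains to identify the single new row
    simp only [List.map_cons, List.map_nil]
    congr 1
    congr 1
    -- pvFillRowB at row m = reference fill of rows[m] on the threaded pool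
    have hgetm : PySem.List.pyGetD rows ((m : Nat) : Int) [] = rows[m] := by
      rw [PySem.List.pyGetD_natCast]; exact List.getD_eq_getElem _ _ hmr
    rw [pvFillRowB_eq, hgetm]
    -- now identify the pools
    set Nm : Nat := ((rows.take m).map (fun row => (row.take sarakkeet.toNat).count "+")).sum with hNm
    by_cases hpos : 0 ≤ sarakkeet
    · -- counts are the take-counts, offsets are their prefix sums
      have hce := pvCounts_eq sarakkeet rows hpos
      have hlenc : (pvCounts sarakkeet rows).length = rows.length := by
        simp [pvCounts]
      have hsum : ∀ j : Nat, j ≤ rows.length →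
          PySem.List.pyGetD (pvScan 0 (pvCounts sarakkeet rows)) ((j : Nat) : Int) 0
            = ((((rows.take j).map (fun row => (row.take sarakkeet.toNat).count "+")).sum : Nat) : Int) := by
        intro j hj
        rw [pvScan_getD _ _ _ (by omega), hce, zero_add, ← List.map_take]
        simp only [Nat.cast_list_sum, List.map_map, List.map_take]
        rfl
      have h1 : PySem.List.pyGetD (pvScan 0 (pvCounts sarakkeet rows)) ((m : Nat) : Int) 0
          = ((Nm : Nat) : Int) := hsum m (by omega)
      have hcast1 : ((m : Nat) : Int) + 1 = (((m + 1 : Nat)) : Int) := by push_cast; ring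
      have h2 : PySem.List.pyGetD (pvScan 0 (pvCounts sarakkeet rows)) (((m : Nat) : Int) + 1) 0
          = (((Nm + (rows[m].take sarakkeet.toNat).count "+" : Nat)) : Int) := by
        rw [hcast1, hsum (m + 1) (by omega)]
        congr 1
        rw [htake, List.map_append, List.sum_append]; simp
        rw [← List.map_take]
      rw [h1, h2, PySem.List.slice_natCast, hpool]
      rw [show Nm + (rows[m].take sarakkeet.toNat).count "+" - Nm
          = (rows[m].take sarakkeet.toNat).count "+" from by omega]
      exact pvFillRow_fst_take sarakkeet rows[m] (joukko.drop Nm) _ le_rfl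
    · -- sarakkeet < 0: no cell is ever replaced, the pool is irrelevant
      have ht0 : sarakkeet.toNat = 0 := by omega
      rw [pvFillRow_eq_pvFR, pvFillRow_eq_pvFR]
      simp [ht0, pvFR]

-- ===== VERDICT (by name: the statement is the Claim_ definition above) =====
theorem korvaa_plussa_listalla_spec : Claim_equal_korvaa_plussa_listalla := by
  intro rivit sarakkeet talo joukko _ hpre
  obtain ⟨hn, hs, hc⟩ := hpre
  simp only [Spec_korvaa_plussa_listalla, korvaa_plussa_listalla, korvaa_plussa_listalla_alt]
  have hrange : PySem.List.pyRange 0 rivit 1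
      = (List.range rivit.toNat).map (fun (k : Nat) => (k : Int)) := by
    rw [PySem.List.pyRange_one]; simp
  rw [hrange]
  -- A's side
  have hlen0 : (((List.range rivit.toNat).map (fun (k : Nat) => (k : Int))).map
      (fun _ => ([] : List String))).length = rivit.toNat := by simp
  rw [pvInitA talo rivit.toNat rivit.toNat le_rfl hn _ hlen0]
  have hdrop : (((List.range rivit.toNat).map (fun (k : Nat) => (k : Int))).map
      (fun _ => ([] : List String))).drop rivit.toNat = [] := by
    apply List.drop_eq_nil_of_le; simp
  rw [hdrop, List.append_nil]
  have hrl : rivit.toNat ≤ (talo.take rivit.toNat).length := by simp; omega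
  obtain ⟨ho, _⟩ := pvOuter sarakkeet joukko (talo.take rivit.toNat) rivit.toNat hrl hs hc
  rw [ho]
  -- B's side: counts, offsets, and the row map over talo become their take-n forms
  have hcounts : ((List.range rivit.toNat).map (fun (k : Nat) => (k : Int))).map
      (fun r => (PySem.List.count
        (PySem.List.slice (PySem.List.pyGetD talo r []) none (some sarakkeet)) "+" : Int))
      = pvCounts sarakkeet (talo.take rivit.toNat) := by
    rw [pvMapRows talo
      (fun row => (PySem.List.count (PySem.List.slice row none (some sarakkeet)) "+" : Int))
      rivit.toNat hn]
    rfl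
  rw [hcounts]
  have hoff : (pvCounts sarakkeet (talo.take rivit.toNat)).foldl
      (fun offs c => offs ++ [PySem.List.pyGetD offs (-1) 0 + c]) [0]
      = pvScan 0 (pvCounts sarakkeet (talo.take rivit.toNat)) := by
    have := pvOffsetsFold (pvCounts sarakkeet (talo.take rivit.toNat)) [] 0
    simpa using this
  rw [hoff]
  -- the row map only reads talo at indices < rivit.toNat, so talo may be cut to take n
  have hmapcut : ((List.range rivit.toNat).map (fun (k : Nat) => (k : Int))).map
      (pvFillRowB sarakkeet joukko (pvScan 0 (pvCounts sarakkeet (talo.take rivit.toNat))) talo)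
      = ((List.range rivit.toNat).map (fun (k : Nat) => (k : Int))).map
      (pvFillRowB sarakkeet joukko (pvScan 0 (pvCounts sarakkeet (talo.take rivit.toNat)))
        (talo.take rivit.toNat)) := by
    refine List.map_congr_left (fun r hr => ?_)
    rw [List.mem_map] at hr
    obtain ⟨k, hk, rfl⟩ := hr
    rw [List.mem_range] at hk
    have hget : PySem.List.pyGetD talo ((k : Nat) : Int) []
        = PySem.List.pyGetD (talo.take rivit.toNat) ((k : Nat) : Int) [] := by
      rw [PySem.List.pyGetD_natCast, PySem.List.pyGetD_natCast,
        List.getD_eq_getElem?_getD, List.getD_eq_getElem?_getD, List.getElem?_take_of_lt hk]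
    unfold pvFillRowB
    rw [hget]
  rw [hmapcut]
  rw [pvOuterB sarakkeet joukko (talo.take rivit.toNat) rivit.toNat hrl hs hc]
  have htt : (talo.take rivit.toNat).take rivit.toNat = talo.take rivit.toNat := by
    simp [List.take_take]
  have hdd : (talo.take rivit.toNat).drop rivit.toNat = [] := by
    apply List.drop_eq_nil_of_le; simp
  rw [htt, hdd, List.append_nil]
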